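-- pv_equiv track=rewrite | github.com/randombenj/packhack | app/__main__.py | find_point
-- ===== SOURCE A (Python) =====
-- def find_point(game_grid, search_for, agent_id):
--     half_of_length = int(len(game_grid[0]) / 2)
--
--     if agent_id == 0:
--         for y, rows in enumerate(game_grid):
--             if search_for in rows[half_of_length:]:
--                 x = rows[half_of_length:].index(search_for)
--                 return (half_of_length + x, y)
--     elif agent_id == 1:
--         for y, rows in enumerate(game_grid):
--             if search_for in rows[0:half_of_length]:
--                 x = rows[0:half_of_length].index(search_for)
--                 return (x, y)
-- ===== SOURCE B (Python) =====
-- def find_point(game_grid, search_for, agent_id):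
--     half = int(len(game_grid[0]) / 2)
--     if agent_id != 0 and agent_id != 1:
--         return None
--     pos = {}
--     for y, row in enumerate(game_grid):
--         if agent_id == 0:
--             lo, hi = half, len(row)
--         else:
--             lo, hi = 0, min(half, len(row))
--         for j in range(lo, hi):
--             v = row[j]
--             if v not in pos:
--                 pos[v] = (j, y)
--     return pos.get(search_for)
-- ===== Notes on version B (the rewrite author's own statement) =====
-- stated objective: alternative
-- what changed: Instead of scanning each row's half-slice for the target with in + .index and returning early, B builds a dictionary mapping every value in the relevant half-region to its first (row-major) position in one indexing pass and answers with a single dict lookup; out-of-range agent ids are rejected up front.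
import Mathlib
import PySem

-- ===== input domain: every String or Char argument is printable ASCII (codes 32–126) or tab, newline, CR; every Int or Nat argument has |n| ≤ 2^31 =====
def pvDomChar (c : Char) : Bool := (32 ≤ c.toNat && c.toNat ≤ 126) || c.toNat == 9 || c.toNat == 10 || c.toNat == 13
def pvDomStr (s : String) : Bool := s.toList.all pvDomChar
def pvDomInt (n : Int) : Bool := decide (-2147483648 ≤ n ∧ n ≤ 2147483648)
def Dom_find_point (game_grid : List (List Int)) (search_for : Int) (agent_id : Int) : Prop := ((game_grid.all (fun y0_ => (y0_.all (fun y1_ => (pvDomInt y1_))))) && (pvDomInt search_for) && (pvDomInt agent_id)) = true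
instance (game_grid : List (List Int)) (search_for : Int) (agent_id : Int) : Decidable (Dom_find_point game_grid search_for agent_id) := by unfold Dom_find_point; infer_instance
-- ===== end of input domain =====

-- B builds a value->first-position index dictionary over the half-region in one pass and answers by a single lookup, instead of A's per-row slice + `in` scan + `.index` rescan with early return (alternative decomposition, same asymptotics).


-- ===== PORT A =====
-- the agent-0 loop: rows[half:] membership scan, then .index on the same slice
def goA0 (s half : Int) : List (List Int) → Int → Option (Int × Int)
  | [], _ => none
  | row :: rest, y =>
    let sl := PySem.List.slice row (some half) none
    if s ∈ sl then
      match PySem.List.index? sl s with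
      | some x => some (half + (x : Int), y)
      | none => none   -- unreachable: membership just checked
    else goA0 s half rest (y + 1)

-- the agent-1 loop: rows[0:half] membership scan, then .index on the same slice
def goA1 (s half : Int) : List (List Int) → Int → Option (Int × Int)
  | [], _ => none
  | row :: rest, y =>
    let sl := PySem.List.slice row (some 0) (some half)
    if s ∈ sl then
      match PySem.List.index? sl s with
      | some x => some ((x : Int), y)
      | none => none   -- unreachable: membership just checked
    else goA1 s half rest (y + 1)

def find_point (game_grid : List (List Int)) (search_for : Int) (agent_id : Int) : Option (Int × Int) :=
  match PySem.List.pyGet? game_grid 0 with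
  | none => none   -- Python raises IndexError here; excluded by Pre_
  | some row0 =>
    -- int(len/2) on a nonnegative length is exactly floor division by 2
    let half : Int := PySem.Int.floordiv (row0.length : Int) 2
    if agent_id = 0 then goA0 search_for half game_grid 0
    else if agent_id = 1 then goA1 search_for half game_grid 0
    else none

-- ===== PORT B =====
-- B's inner loop: walk the column indices of one row, recording each value's first position
def addIdx (row : List Int) (y : Int) : List Int → PySem.Dict Int (Int × Int) → PySem.Dict Int (Int × Int)
  | [], d => d
  | j :: js, d =>
    match PySem.List.pyGet? row j with
    | none => addIdx row y js d   -- unreachable: j is drawn from range(lo, hi) with hi ≤ len(row)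
    | some v => addIdx row y js (if d.contains v then d else d.insert v (j, y))

-- B's outer loop: enumerate rows, pick the column range from agent_id, extend the index
def buildB (half aid : Int) : List (List Int) → Int → PySem.Dict Int (Int × Int) → PySem.Dict Int (Int × Int)
  | [], _, d => d
  | row :: rest, y, d =>
    let lo : Int := if aid = 0 then half else 0
    let hi : Int := if aid = 0 then (row.length : Int) else min half (row.length : Int)
    buildB half aid rest (y + 1) (addIdx row y (PySem.List.pyRange lo hi 1) d)

def find_point_alt (game_grid : List (List Int)) (search_for : Int) (agent_id : Int) : Option (Int × Int) :=
  match PySem.List.pyGet? game_grid 0 with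
  | none => none   -- IndexError in B too; excluded by Pre_
  | some row0 =>
    let half : Int := PySem.Int.floordiv (row0.length : Int) 2
    if agent_id ≠ 0 ∧ agent_id ≠ 1 then none
    else (buildB half agent_id game_grid 0 PySem.Dict.empty).get? search_for

-- ===== PRECONDITION & SPEC =====
-- Pre_ excludes only the empty grid, on which both A and B raise IndexError at len(game_grid[0]).
def Pre_find_point (game_grid : List (List Int)) (search_for : Int) (agent_id : Int) : Prop :=
  game_grid ≠ []
instance (game_grid : List (List Int)) (search_for : Int) (agent_id : Int) : Decidable (Pre_find_point game_grid search_for agent_id) := by unfold Pre_find_point; infer_instance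
def pvWitness_find_point : List (List Int) × Int × Int := ([[1, 2, 3, 4], [5, 6, 7, 8]], 7, 0)

def Spec_find_point (game_grid : List (List Int)) (search_for : Int) (agent_id : Int) (out : Option (Int × Int)) : Prop := out = find_point_alt game_grid search_for agent_id
instance (game_grid : List (List Int)) (search_for : Int) (agent_id : Int) (out : Option (Int × Int)) : Decidable (Spec_find_point game_grid search_for agent_id out) := by unfold Spec_find_point; infer_instance

-- ===== CLAIM (what is proved, stated in full; the proofs are below) =====
def Claim_equal_find_point : Prop := ∀ (game_grid : List (List Int)) (search_for : Int) (agent_id : Int), Dom_find_point game_grid search_for agent_id → Pre_find_point game_grid search_for agent_id → Spec_find_point game_grid search_for agent_id (find_point game_grid search_for agent_id)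

-- ===== LEMMAS AND PROOFS =====

-- proof-side helper: the first-match scan of one row's index list (what A's slice scans compute)
def scanB (row : List Int) (s : Int) : List Int → Option Int
  | [] => none
  | j :: js => if PySem.List.pyGet? row j = some s then some j else scanB row s js

-- proof-side helper: A's early-return search written as a direct per-index scan
def goScan (s half aid : Int) : List (List Int) → Int → Option (Int × Int)
  | [], _ => none
  | row :: rest, y =>
    let lo : Int := if aid = 0 then half else 0
    let hi : Int := if aid = 0 then (row.length : Int) else min half (row.length : Int)
    match scanB row s (PySem.List.pyRange lo hi 1) with
    | some j => some (j, y)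
    | none => goScan s half aid rest (y + 1)

-- B's index scan over range(lo,hi) (hi ≤ |row|) finds exactly A's index?-in-slice result, shifted by lo
theorem scanB_eq (row : List Int) (s : Int) (lo hi : Nat) (hhi : hi ≤ row.length) :
    scanB row s (PySem.List.pyRange (lo : Int) (hi : Int) 1)
      = Option.map (fun x : Nat => ((lo + x : Nat) : Int))
          (PySem.List.index? ((row.take hi).drop lo) s) := by
  by_cases hlt : lo < hi
  · have hlen : lo < (row.take hi).length := by
      simp [List.length_take]; omega
    rw [PySem.List.pyRange_one_cons (by exact_mod_cast hlt)]
    have hdrop : (row.take hi).drop lo = (row.take hi)[lo] :: (row.take hi).drop (lo + 1) :=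
      List.drop_eq_getElem_cons hlen
    have hget : (row.take hi)[lo] = row[lo]'(by omega) := List.getElem_take
    have hpg : PySem.List.pyGet? row ((lo : Nat) : Int) = some (row[lo]'(by omega)) := by
      rw [PySem.List.pyGet?_natCast, List.getElem?_eq_getElem (by omega)]
    rw [hdrop, hget]
    by_cases heq : row[lo]'(by omega : lo < row.length) = s
    · have hguard : PySem.List.pyGet? row ((lo : Nat) : Int) = some s := by rw [hpg, heq]
      simp only [scanB]
      rw [if_pos hguard, heq, PySem.List.index?_cons_self]
      simp
    · have hne : ¬ PySem.List.pyGet? row ((lo : Nat) : Int) = some s := by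
        rw [hpg]; simp [heq]
      simp only [scanB]
      rw [if_neg hne, PySem.List.index?_cons_of_ne _ heq]
      have hrec := scanB_eq row s (lo + 1) hi hhi
      rw [show ((lo : Int) + 1) = (((lo + 1 : Nat)) : Int) by push_cast; ring, hrec]
      cases PySem.List.index? ((row.take hi).drop (lo + 1)) s <;> simp [Nat.add_assoc, Nat.add_comm 1]
  · rw [PySem.List.pyRange_one_eq_nil (by exact_mod_cast Nat.le_of_not_lt hlt)]
    rw [List.drop_eq_nil_of_le (by simp [List.length_take]; omega)]
    simp [scanB, PySem.List.index?]
termination_by hi - lo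

theorem goA0_eq_goScan (s : Int) (h' : Nat) (g : List (List Int)) (y : Int) :
    goA0 s (h' : Int) g y = goScan s (h' : Int) 0 g y := by
  induction g generalizing y with
  | nil => rfl
  | cons row rest ih =>
    have hsl : PySem.List.slice row (some ((h' : Nat) : Int)) none = row.drop h' :=
      PySem.List.slice_from_natCast row h'
    have hscan := scanB_eq row s h' row.length le_rfl
    rw [List.take_length] at hscan
    simp only [goA0, goScan, reduceIte]
    rw [hsl, hscan]
    by_cases hmem : s ∈ row.drop h'
    · obtain ⟨x, hx⟩ : ∃ x, PySem.List.index? (row.drop h') s = some x := by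
        cases hidx : PySem.List.index? (row.drop h') s with
        | none => exact absurd ((PySem.List.index?_eq_none_iff _ _).mp hidx) (by simp [hmem])
        | some x => exact ⟨x, rfl⟩
      rw [if_pos hmem, hx]
      simp only [Option.map_some]
      push_cast
      rfl
    · have hnone : PySem.List.index? (row.drop h') s = none :=
        (PySem.List.index?_eq_none_iff _ _).mpr hmem
      rw [if_neg hmem, hnone]
      simpa using ih (y + 1)

theorem goA1_eq_goScan (s : Int) (h' : Nat) (g : List (List Int)) (y : Int) :
    goA1 s (h' : Int) g y = goScan s (h' : Int) 1 g y := by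
  induction g generalizing y with
  | nil => rfl
  | cons row rest ih =>
    have hsl : PySem.List.slice row (some 0) (some ((h' : Nat) : Int)) = row.take h' := by
      rw [PySem.List.slice_zero_start, PySem.List.slice_to_natCast]
    have hscan := scanB_eq row s 0 (min h' row.length) (by omega)
    have htk : row.take (min h' row.length) = row.take h' := by
      rw [← List.take_length (l := row), List.take_take]
      simp
    rw [htk, List.drop_zero, Nat.cast_zero] at hscan
    have hmin : (min ((h' : Nat) : Int) ((row.length : Nat) : Int)) = ((min h' row.length : Nat) : Int) := by
      push_cast; rfl
    simp only [goA1, goScan]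
    rw [if_neg (by decide : ¬ (1 : Int) = 0), if_neg (by decide : ¬ (1 : Int) = 0), hsl, hmin, hscan]
    by_cases hmem : s ∈ row.take h'
    · obtain ⟨x, hx⟩ : ∃ x, PySem.List.index? (row.take h') s = some x := by
        cases hidx : PySem.List.index? (row.take h') s with
        | none => exact absurd ((PySem.List.index?_eq_none_iff _ _).mp hidx) (by simp [hmem])
        | some x => exact ⟨x, rfl⟩
      rw [if_pos hmem, hx]
      simp
    · have hnone : PySem.List.index? (row.take h') s = none :=
        (PySem.List.index?_eq_none_iff _ _).mpr hmem
      rw [if_neg hmem, hnone]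
      simpa using ih (y + 1)

-- the per-row index build: looking up s afterwards is "old binding, else first match in this row"
theorem addIdx_get (row : List Int) (s y : Int) (js : List Int) (d : PySem.Dict Int (Int × Int)) :
    (addIdx row y js d).get? s
      = (d.get? s).orElse (fun _ => Option.map (fun j => (j, y)) (scanB row s js)) := by
  induction js generalizing d with
  | nil => cases h : d.get? s <;> simp [addIdx, scanB, h]
  | cons j js ih =>
    cases hg : PySem.List.pyGet? row j with
    | none =>
      simp only [addIdx, scanB, hg]
      rw [if_neg (by simp), ih]
    | some v =>
      simp only [addIdx, scanB, hg]
      by_cases hvs : v = s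
      · subst hvs
        rw [if_pos rfl]
        by_cases hc : d.contains v = true
        · have hsome : (d.get? v).isSome := by rw [← PySem.Dict.contains_eq_isSome_get?]; exact hc
          rw [if_pos hc, ih]
          cases h : d.get? v with
          | none => rw [h] at hsome; simp at hsome
          | some p => simp
        · have hnone : d.get? v = none := by
            cases h : d.get? v with
            | none => rfl
            | some p =>
              have : d.contains v = true := by
                rw [PySem.Dict.contains_eq_isSome_get?, h]; rfl
              exact absurd this hc
          rw [if_neg hc, ih, PySem.Dict.get?_insert_self, hnone]
          simp
      · rw [if_neg (show ¬ ((some v : Option Int) = some s) from by simp [hvs])]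
        by_cases hc : d.contains v = true
        · rw [if_pos hc, ih]
        · rw [if_neg hc, ih, PySem.Dict.get?_insert_of_ne (hne := Ne.symm hvs)]

-- the whole index build vs the early-return scan
theorem buildB_get (s half aid : Int) (g : List (List Int)) (y : Int)
    (d : PySem.Dict Int (Int × Int)) :
    (buildB half aid g y d).get? s
      = (d.get? s).orElse (fun _ => goScan s half aid g y) := by
  induction g generalizing y d with
  | nil => cases h : d.get? s <;> simp [buildB, goScan, h]
  | cons row rest ih =>
    simp only [buildB, goScan]
    rw [ih, addIdx_get]
    cases h : d.get? s with
    | some p => simp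
    | none =>
      cases scanB row s (PySem.List.pyRange (if aid = 0 then half else 0)
          (if aid = 0 then (row.length : Int) else min half (row.length : Int)) 1) <;>
        simp [Option.orElse]

-- ===== VERDICT (by name: the statement is the Claim_ definition above) =====
theorem find_point_spec : Claim_equal_find_point := by
  intro g s aid _ hpre
  unfold Spec_find_point find_point find_point_alt
  match g with
  | [] => exact absurd rfl hpre
  | row0 :: rest =>
    simp only [PySem.List.pyGet?_zero_cons]
    have hhalf : PySem.Int.floordiv ((row0.length : Nat) : Int) 2
        = ((row0.length / 2 : Nat) : Int) := by
      exact_mod_cast PySem.Int.floordiv_natCast row0.length 2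
    rw [hhalf]
    by_cases h0 : aid = 0
    · rw [if_pos h0, if_neg (by simp [h0]), h0]
      rw [buildB_get, PySem.Dict.get?_empty]
      simpa using goA0_eq_goScan s _ _ 0
    · by_cases h1 : aid = 1
      · rw [if_neg h0, if_pos h1, if_neg (by simp [h1]), h1]
        rw [buildB_get, PySem.Dict.get?_empty]
        simpa using goA1_eq_goScan s _ _ 0
      · rw [if_neg h0, if_neg h1, if_pos ⟨h0, h1⟩]
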